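-- pv_equiv track=rewrite | github.com/BeeRabbits/PRISM | evaluation/eval_runner.py | _check_no_repetition
-- ===== SOURCE A (Python) =====
-- def _check_no_repetition(response: str) -> bool:
--     """No phrase repeated 3+ times consecutively."""
--     words = response.split()
--     if len(words) < 10:
--         return True
--     # Check for repeated 3-grams
--     for i in range(len(words) - 9):
--         trigram = " ".join(words[i:i+3])
--         count = 0
--         for j in range(i, min(i + 30, len(words) - 2)):
--             if " ".join(words[j:j+3]) == trigram:
--                 count += 1
--         if count >= 3:
--             return False
--     return True
-- ===== SOURCE B (Python) =====
-- def _check_no_repetition(response: str) -> bool: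
--     """No phrase repeated 3+ times consecutively."""
--     words = response.split()
--     n = len(words)
--     if n < 10:
--         return True
--     # one pass: every trigram string, then an index trigram -> sorted start positions
--     trigs = [" ".join(words[p:p+3]) for p in range(n - 2)]
--     positions = {}
--     for p, t in enumerate(trigs):
--         positions.setdefault(t, []).append(p)
--     for i in range(n - 9):
--         if sum(1 for p in positions[trigs[i]] if i <= p <= i + 29) >= 3:
--             return False
--     return True
-- ===== Notes on version B (the rewrite author's own statement) =====
-- stated objective: alternative
-- what changed: Instead of re-joining and comparing up to 30 trigram strings for every candidate window, B builds each trigram string once and a dict mapping trigram -> list of start positions in one pass, then counts for each candidate how many indexed positions fall in the inclusive window [i, i+29].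
import Mathlib
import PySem

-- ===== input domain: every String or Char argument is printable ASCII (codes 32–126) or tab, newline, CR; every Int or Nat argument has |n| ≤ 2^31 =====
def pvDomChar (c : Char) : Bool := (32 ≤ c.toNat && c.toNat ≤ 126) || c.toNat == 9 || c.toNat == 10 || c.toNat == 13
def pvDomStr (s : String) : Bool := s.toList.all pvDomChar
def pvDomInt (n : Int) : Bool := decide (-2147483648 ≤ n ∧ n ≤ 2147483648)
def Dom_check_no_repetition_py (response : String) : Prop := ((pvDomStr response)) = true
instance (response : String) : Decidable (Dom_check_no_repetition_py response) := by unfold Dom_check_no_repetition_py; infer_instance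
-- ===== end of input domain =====

-- B builds a trigram → position-list index in one pass and counts window hits in that
-- list, instead of re-joining and re-comparing 30 trigrams for every window (alternative decomposition).


-- ===== PORT A =====
def check_no_repetition_py (response : String) : Bool :=
  let words := PySem.Str.split₀ response
  let n : Int := (words.length : Int)
  if n < 10 then true
  else
    -- for i in range(len(words)-9): … if count >= 3: return False … return True
    (PySem.List.pyRange 0 (n - 9) 1).all (fun i =>
      let trigram := PySem.Str.join " " (PySem.List.slice words (some i) (some (i + 3)))
      let count : Int := (PySem.List.pyRange i (min (i + 30) (n - 2)) 1).foldl
        (fun c j =>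
          if PySem.Str.join " " (PySem.List.slice words (some j) (some (j + 3))) == trigram
          then c + 1 else c) 0
      !decide (count ≥ 3))

-- ===== PORT B =====
def check_no_repetition_py_alt (response : String) : Bool :=
  let words := PySem.Str.split₀ response
  let n : Int := (words.length : Int)
  if n < 10 then true
  else
    -- trigs = [" ".join(words[p:p+3]) for p in range(n-2)]
    let trigs := (PySem.List.pyRange 0 (n - 2) 1).map
      (fun p => PySem.Str.join " " (PySem.List.slice words (some p) (some (p + 3))))
    -- for p, t in enumerate(trigs): positions.setdefault(t, []).append(p)
    let positions : PySem.Dict String (List Int) :=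
      ((PySem.List.enumerate trigs 0).map (fun pr => (pr.2, pr.1))).foldl
        (fun d q => d.modify q.1 [] (fun x => x ++ [q.2])) PySem.Dict.empty
    -- for i in range(n-9): if sum(1 for p in positions[trigs[i]] if i <= p <= i+29) >= 3: return False
    (PySem.List.pyRange 0 (n - 9) 1).all (fun i =>
      let ps := positions.getD (PySem.List.pyGetD trigs i "") []
      !decide (ps.countP (fun p => decide (i ≤ p ∧ p ≤ i + 29)) ≥ 3))

-- ===== PRECONDITION & SPEC =====
def Spec_check_no_repetition_py (response : String) (out : Bool) : Prop := out = check_no_repetition_py_alt response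
instance (response : String) (out : Bool) : Decidable (Spec_check_no_repetition_py response out) := by unfold Spec_check_no_repetition_py; infer_instance

-- ===== CLAIM (what is proved, stated in full; the proofs are below) =====
def Claim_equal_check_no_repetition_py : Prop := ∀ (response : String), Dom_check_no_repetition_py response → Spec_check_no_repetition_py response (check_no_repetition_py response)

-- ===== LEMMAS AND PROOFS =====

-- all over the same list agrees when the bodies agree on members
theorem pv_all_congr_mem {α : Type} (l : List α) (f g : α → Bool)
    (h : ∀ x ∈ l, f x = g x) : l.all f = l.all g := by
  induction l with
  | nil => rfl
  | cons x xs ih =>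
    simp only [List.all_cons, h x (by simp), ih (fun y hy => h y (by simp [hy]))]

-- the per-candidate counts of A and B agree
theorem pv_main (g : Int → String) (N : Nat) (i : Int)
    (h0 : 0 ≤ i) (h1 : i < (N : Int) - 9) :
    (let trigs := (PySem.List.pyRange 0 ((N : Int) - 2) 1).map g
     let positions : PySem.Dict String (List Int) :=
       ((PySem.List.enumerate trigs 0).map (fun pr => (pr.2, pr.1))).foldl
         (fun d q => d.modify q.1 [] (fun x => x ++ [q.2])) PySem.Dict.empty
     ((positions.getD (PySem.List.pyGetD trigs i "") []).countP
        (fun p => decide (i ≤ p ∧ p ≤ i + 29)) : Int)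
     = (PySem.List.pyRange i (min (i + 30) ((N : Int) - 2)) 1).foldl
        (fun c j => if g j == g i then c + 1 else c) 0) := by
  simp only
  have hti : ∀ j : Int, 0 ≤ j → j < (N : Int) - 2 →
      PySem.List.pyGetD ((PySem.List.pyRange 0 ((N : Int) - 2) 1).map g) j "" = g j := by
    intro j hj0 hj2
    rw [show (N : Int) - 2 = ((N - 2 : Nat) : Int) by omega,
        show j = ((j.toNat : Nat) : Int) by omega]
    exact PySem.List.pyGetD_map_pyRange g _ _ _ (by omega)
  rw [PySem.List.foldl_count_if (fun j => g j == g i) _ 0, zero_add]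
  rw [hti i h0 (by omega)]
  rw [PySem.Dict.getD_foldl_modify_append, PySem.Dict.getD_empty, List.nil_append]
  rw [PySem.List.enumerate_eq_map_pyRange _ ""]
  have hlen : PySem.List.len ((PySem.List.pyRange 0 ((N : Int) - 2) 1).map g) = (N : Int) - 2 := by
    rw [PySem.List.len_eq, List.length_map, PySem.List.length_pyRange_one]; omega
  rw [hlen, List.map_map, List.countP_map, List.countP_filter, List.countP_map, Nat.cast_inj]
  refine Eq.trans
    (List.countP_congr (q := fun j => decide (i ≤ j ∧ j ≤ i + 29) && (g j == g i)) ?_) ?_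
  · intro x hx
    rw [PySem.List.mem_pyRange_one] at hx
    simp [hti x hx.1 hx.2]
  · rw [PySem.List.pyRange_one_append 0 (min (i + 30) ((N : Int) - 2)) ((N : Int) - 2)
          (by omega) (by omega),
        PySem.List.pyRange_one_append 0 i (min (i + 30) ((N : Int) - 2)) h0 (by omega),
        List.countP_append, List.countP_append]
    have z1 : List.countP (fun j => decide (i ≤ j ∧ j ≤ i + 29) && (g j == g i))
        (PySem.List.pyRange 0 i 1) = 0 := by
      rw [List.countP_eq_zero]
      intro a ha
      rw [PySem.List.mem_pyRange_one] at ha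
      simp only [Bool.and_eq_true, decide_eq_true_eq]
      rintro ⟨⟨ha1, _⟩, -⟩
      omega
    have z3 : List.countP (fun j => decide (i ≤ j ∧ j ≤ i + 29) && (g j == g i))
        (PySem.List.pyRange (min (i + 30) ((N : Int) - 2)) ((N : Int) - 2) 1) = 0 := by
      rw [List.countP_eq_zero]
      intro a ha
      rw [PySem.List.mem_pyRange_one] at ha
      simp only [Bool.and_eq_true, decide_eq_true_eq]
      rintro ⟨⟨_, ha2⟩, -⟩
      omega
    rw [z1, z3, Nat.zero_add, Nat.add_zero]
    refine List.countP_congr ?_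
    intro x hx
    rw [PySem.List.mem_pyRange_one] at hx
    simp only [Bool.and_eq_true, decide_eq_true_eq]
    constructor
    · exact fun h => h.2
    · exact fun h => ⟨⟨hx.1, by omega⟩, h⟩

-- the per-candidate counts of A and B agree (instantiation of pv_main at this task's trigram function)
theorem pv_count_eq (words : List String) (i : Int)
    (h0 : 0 ≤ i) (h1 : i < (words.length : Int) - 9) :
    (let n : Int := (words.length : Int)
     let T : Int → String := fun p => PySem.Str.join " " (PySem.List.slice words (some p) (some (p + 3)))
     let trigs := (PySem.List.pyRange 0 (n - 2) 1).map T
     let positions : PySem.Dict String (List Int) :=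
       ((PySem.List.enumerate trigs 0).map (fun pr => (pr.2, pr.1))).foldl
         (fun d q => d.modify q.1 [] (fun x => x ++ [q.2])) PySem.Dict.empty
     ((positions.getD (PySem.List.pyGetD trigs i "") []).countP
        (fun p => decide (i ≤ p ∧ p ≤ i + 29)) : Int)
     = (PySem.List.pyRange i (min (i + 30) (n - 2)) 1).foldl
        (fun c j => if T j == T i then c + 1 else c) 0) := by
  exact pv_main (fun p => PySem.Str.join " " (PySem.List.slice words (some p) (some (p + 3))))
    words.length i h0 h1

-- ===== VERDICT (by name: the statement is the Claim_ definition above) =====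
theorem check_no_repetition_py_spec : Claim_equal_check_no_repetition_py := by
  intro response _
  unfold Spec_check_no_repetition_py check_no_repetition_py check_no_repetition_py_alt
  set words := PySem.Str.split₀ response with hw
  by_cases hn : (words.length : Int) < 10
  · simp [hn]
  · simp only [hn, if_false]
    apply pv_all_congr_mem
    intro i hi
    rw [PySem.List.mem_pyRange_one] at hi
    have hc := pv_count_eq words i hi.1 hi.2
    simp only at hc ⊢
    rw [← hc]
    exact congrArg (fun b => !b) (decide_eq_decide.mpr (by constructor <;> (intro h; exact_mod_cast h)))
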